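-- pv_equiv track=rewrite | github.com/DUB1401/dublib | src/dublib/Methods.py | ReplaceDictionaryKey
-- ===== SOURCE A (Python) =====
-- def ReplaceDictionaryKey(dictionary: dict, old_key: any, new_key: any) -> dict:
-- 	"""
-- 	Заменяет ключ в словаре, сохраняя исходный порядок элементов.
-- 		dictionary – обрабатываемый словарь;
-- 		old_key – старое название ключа;
-- 		new_key – новое название ключа.
-- 	"""
--
-- 	# Результат выполнения.
-- 	Result = dict()
-- 	# Если ключ не найден, выбросить исключение.
-- 	if old_key not in dictionary.keys(): raise KeyError(str(old_key))
--
-- 	# Для каждого ключа.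
-- 	for Key in dictionary.keys():
--
-- 		# Если текущий ключ совпадает с искомым.
-- 		if Key == old_key:
-- 			# Замена ключа новым.
-- 			Result[new_key] = dictionary[old_key]
--
-- 		else:
-- 			# Копирование старой пары ключ-значение.
-- 			Result[Key] = dictionary[Key]
--
-- 	return Result
-- ===== SOURCE B (Python) =====
-- def ReplaceDictionaryKey(dictionary: dict, old_key: any, new_key: any) -> dict:
-- 	"""Replace a key preserving order: stream the items, stop at old_key, and merge head | {new_key: value} | dict(rest)."""
-- 	it = iter(dictionary.items())
-- 	head = {}
-- 	for key, value in it: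
-- 		if key == old_key:
-- 			return head | {new_key: value} | dict(it)
-- 		head[key] = value
-- 	raise KeyError(str(old_key))
-- ===== Notes on version B (the rewrite author's own statement) =====
-- stated objective: alternative
-- what changed: Instead of A's up-front membership guard plus a full rebuild loop with a per-key replace/copy branch, B streams the items once, early-returns at the first key == old_key by merging head | {new_key: value} | dict(remaining iterator), and raises KeyError only if the stream is exhausted.
import Mathlib
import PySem

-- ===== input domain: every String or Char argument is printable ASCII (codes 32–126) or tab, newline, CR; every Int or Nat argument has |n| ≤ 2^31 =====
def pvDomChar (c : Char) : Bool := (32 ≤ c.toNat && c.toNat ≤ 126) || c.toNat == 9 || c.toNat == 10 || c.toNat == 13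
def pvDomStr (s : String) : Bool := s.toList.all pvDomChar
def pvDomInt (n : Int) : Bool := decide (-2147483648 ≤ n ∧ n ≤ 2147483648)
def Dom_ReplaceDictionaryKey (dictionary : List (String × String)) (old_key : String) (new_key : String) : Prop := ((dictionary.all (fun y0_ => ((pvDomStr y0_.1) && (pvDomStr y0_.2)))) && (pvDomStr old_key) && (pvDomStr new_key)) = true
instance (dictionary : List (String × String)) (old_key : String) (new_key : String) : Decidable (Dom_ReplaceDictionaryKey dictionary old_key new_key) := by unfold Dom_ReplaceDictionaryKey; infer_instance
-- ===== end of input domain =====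

-- B streams the items once, stops at old_key, and merges head | {new_key: value} | dict(rest)
-- (early-return split + two dict unions) instead of A's guarded full-rebuild loop with a per-key branch.

-- ===== PORT A =====
-- literal port of A: guard, then a loop over the dict's keys rebuilding Result with a branch per key.
-- dictionary[k] is ported as getD with "" default: under Pre_ every looked-up key is present, so this is exact.
def ReplaceDictionaryKey (dictionary : List (String × String)) (old_key : String) (new_key : String) : List (String × String) :=
  let D := PySem.Dict.mk dictionary
  if D.contains old_key = false then []   -- Python: raise KeyError(str(old_key)); excluded by Pre_
  else
    (D.keys.foldl (fun (Result : PySem.Dict String String) Key =>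
      if Key == old_key then Result.insert new_key (D.getD old_key "")
      else Result.insert Key (D.getD Key "")) PySem.Dict.empty).items

-- ===== PORT B =====
-- literal port of B: walk the item stream accumulating head; at the first key == old_key return
-- head | {new_key: value} | dict(rest) (d1 | d2 is PySem.Dict.update d1 d2.items; dict(rest) is Dict.ofList rest).
def pvAltGo (old_key new_key : String) : List (String × String) → PySem.Dict String String → List (String × String)
  | [], _ => []   -- Python: raise KeyError(str(old_key)); excluded by Pre_
  | (key, value) :: rest, head =>
    if key == old_key then
      ((head.insert new_key value).update (PySem.Dict.ofList rest).items).items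
    else pvAltGo old_key new_key rest (head.insert key value)

def ReplaceDictionaryKey_alt (dictionary : List (String × String)) (old_key : String) (new_key : String) : List (String × String) :=
  pvAltGo old_key new_key (PySem.Dict.mk dictionary).items PySem.Dict.empty

-- ===== PRECONDITION & SPEC =====
-- Pre_ requires (a) old_key to be a key (otherwise Python A — and B — raise KeyError), and
-- (b) the association list to have pairwise-distinct keys: it encodes a Python dict, whose keys are
-- necessarily distinct, so (b) excludes no input the Python function can receive.
def Pre_ReplaceDictionaryKey (dictionary : List (String × String)) (old_key : String) (new_key : String) : Prop :=
  (dictionary.map Prod.fst).Nodup ∧ old_key ∈ dictionary.map Prod.fst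
instance (dictionary : List (String × String)) (old_key : String) (new_key : String) : Decidable (Pre_ReplaceDictionaryKey dictionary old_key new_key) := by unfold Pre_ReplaceDictionaryKey; infer_instance
def pvWitness_ReplaceDictionaryKey : (List (String × String)) × String × String := ([("a", "1"), ("b", "2")], "a", "c")
def Spec_ReplaceDictionaryKey (dictionary : List (String × String)) (old_key : String) (new_key : String) (out : List (String × String)) : Prop := out = ReplaceDictionaryKey_alt dictionary old_key new_key
instance (dictionary : List (String × String)) (old_key : String) (new_key : String) (out : List (String × String)) : Decidable (Spec_ReplaceDictionaryKey dictionary old_key new_key out) := by unfold Spec_ReplaceDictionaryKey; infer_instance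

-- ===== CLAIM (what is proved, stated in full; the proofs are below) =====
def Claim_equal_ReplaceDictionaryKey : Prop := ∀ (dictionary : List (String × String)) (old_key : String) (new_key : String), Dom_ReplaceDictionaryKey dictionary old_key new_key → Pre_ReplaceDictionaryKey dictionary old_key new_key → Spec_ReplaceDictionaryKey dictionary old_key new_key (ReplaceDictionaryKey dictionary old_key new_key)

-- ===== LEMMAS AND PROOFS =====

-- dict(L) keeps L unchanged when L's keys are pairwise distinct.
theorem pv_ofList_items_of_nodup (L : List (String × String)) (h : (L.map Prod.fst).Nodup) :
    (PySem.Dict.ofList L).items = L := by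
  have := PySem.Dict.items_foldl_insert_fresh L (k := Prod.fst) (v := Prod.snd)
    (d := PySem.Dict.empty) (by intro a _; simp) h
  simpa [PySem.Dict.ofList, PySem.Dict.update] using this

-- B's early-return stream walk equals a fold of insert over the key-replaced pair list.
theorem pv_altGo_char (old_key new_key : String) (L : List (String × String))
    (head : PySem.Dict String String)
    (hnd : (L.map Prod.fst).Nodup) (hmem : old_key ∈ L.map Prod.fst) :
    pvAltGo old_key new_key L head =
      ((L.map (fun p => ((if p.1 == old_key then new_key else p.1), p.2))).foldl
        (fun (r : PySem.Dict String String) p => r.insert p.1 p.2) head).items := by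
  induction L generalizing head with
  | nil => simp at hmem
  | cons p rest ih =>
    obtain ⟨key, value⟩ := p
    simp only [List.map_cons, List.nodup_cons] at hnd
    by_cases h : key = old_key
    · subst h
      have hnotin : key ∉ rest.map Prod.fst := hnd.1
      have hrest : rest.map (fun p => ((if p.1 == key then new_key else p.1), p.2)) = rest := by
        conv_rhs => rw [← List.map_id rest]
        apply List.map_congr_left
        intro q hq
        have : q.1 ≠ key := fun hc => hnotin (hc ▸ List.mem_map_of_mem hq)
        simp [this]
      simp only [pvAltGo, beq_self_eq_true, if_true, List.map_cons, List.foldl_cons, hrest]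
      rw [pv_ofList_items_of_nodup rest hnd.2, PySem.Dict.update]
    · have hmem' : old_key ∈ rest.map Prod.fst := by
        rcases List.mem_cons.mp hmem with h1 | h1
        · exact absurd h1.symm h
        · exact h1
      simp only [pvAltGo, List.map_cons, List.foldl_cons]
      simp only [show (key == old_key) = false from by simpa using h, Bool.false_eq_true, if_false]
      exact ih (head.insert key value) hnd.2 hmem'

theorem ReplaceDictionaryKey_eq_alt (dictionary : List (String × String)) (old_key new_key : String)
    (hpre : Pre_ReplaceDictionaryKey dictionary old_key new_key) :
    ReplaceDictionaryKey dictionary old_key new_key = ReplaceDictionaryKey_alt dictionary old_key new_key := by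
  obtain ⟨hnd, hmem⟩ := hpre
  have hkeys : (PySem.Dict.mk dictionary).keys = dictionary.map Prod.fst := by
    simp [PySem.Dict.keys]
  have hnd' : (PySem.Dict.mk dictionary).keys.Nodup := by rw [hkeys]; exact hnd
  have hmem' : old_key ∈ (PySem.Dict.mk dictionary).keys := by rw [hkeys]; exact hmem
  have hcont : (PySem.Dict.mk dictionary).contains old_key = true := by
    rw [PySem.Dict.contains_iff_mem_keys]; exact hmem'
  have hitems : (PySem.Dict.mk dictionary).items = dictionary := rfl
  unfold ReplaceDictionaryKey ReplaceDictionaryKey_alt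
  simp only [hcont, Bool.true_eq_false, if_false]
  rw [pv_altGo_char old_key new_key (PySem.Dict.mk dictionary).items PySem.Dict.empty
      (by rw [hitems]; exact hnd) (by rw [hitems]; exact hmem)]
  congr 1
  calc (PySem.Dict.mk dictionary).keys.foldl (fun (Result : PySem.Dict String String) Key =>
          if Key == old_key then Result.insert new_key ((PySem.Dict.mk dictionary).getD old_key "")
          else Result.insert Key ((PySem.Dict.mk dictionary).getD Key "")) PySem.Dict.empty
      = ((PySem.Dict.mk dictionary).keys.map
          (fun k => ((if k == old_key then new_key else k), (PySem.Dict.mk dictionary).getD k ""))).foldl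
          (fun (r : PySem.Dict String String) p => r.insert p.1 p.2) PySem.Dict.empty := by
        rw [List.foldl_map]
        apply PySem.List.foldl_congr_mem
        intro r k _
        by_cases h : k = old_key
        · subst h; simp
        · simp [h]
    _ = ((PySem.Dict.mk dictionary).items.map
          (fun p => ((if p.1 == old_key then new_key else p.1), p.2))).foldl
          (fun (r : PySem.Dict String String) p => r.insert p.1 p.2) PySem.Dict.empty := by
        rw [PySem.Dict.items_eq_map_keys (PySem.Dict.mk dictionary) hnd' "", List.map_map]
        rfl

-- ===== VERDICT (by name: the statement is the Claim_ definition above) =====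
theorem ReplaceDictionaryKey_spec : Claim_equal_ReplaceDictionaryKey := by
  intro dictionary old_key new_key _ hpre
  exact ReplaceDictionaryKey_eq_alt dictionary old_key new_key hpre
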